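-- pv_equiv track=rewrite | github.com/Apolinapolis/ubung_macht_den_meister | boom.py | func
-- ===== SOURCE A (Python) =====
-- def func(s):
--     result = []
--     current = ''
--
--     for el in s:
--         if el.isdigit():
--             current += el
--         else:
--             if current:
--                 result.append(int(current))
--                 current = ''
--     if current:
--         result.append(int(current))
--     return max(result)
-- ===== SOURCE B (Python) =====
-- def func(s):
--     spaced = ''.join(c if c.isdigit() else ' ' for c in s)
--     return max(int(w) for w in spaced.split())
-- ===== Notes on version B (the rewrite author's own statement) =====
-- stated objective: simpler
-- what changed: Replaces the single-pass accumulator loop (result list + current buffer with a post-loop flush) by staged passes: translate every non-digit character to a space, whitespace-split the translated string, and take max of the int of each piece.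
import Mathlib
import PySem

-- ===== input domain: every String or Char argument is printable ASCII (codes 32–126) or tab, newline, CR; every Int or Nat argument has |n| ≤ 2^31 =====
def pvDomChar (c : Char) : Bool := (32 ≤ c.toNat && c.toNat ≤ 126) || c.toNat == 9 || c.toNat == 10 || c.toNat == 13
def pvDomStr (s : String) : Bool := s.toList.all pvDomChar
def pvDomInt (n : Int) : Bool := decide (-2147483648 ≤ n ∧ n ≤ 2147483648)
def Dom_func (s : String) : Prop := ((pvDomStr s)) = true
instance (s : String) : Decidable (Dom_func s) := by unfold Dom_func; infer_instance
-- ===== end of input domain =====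

-- B replaces A's accumulator loop by staged passes: translate non-digits to spaces, whitespace-split, max of ints (simpler).
-- Shared helper: int(cs) on a digit run, used by both ports.
def pvInt (cs : List Char) : Int := (PySem.Int.ofChars? cs).getD 0

-- ===== PORT A =====
def funcStep (st : List Int × List Char) (el : Char) : List Int × List Char :=
  if PySem.Chars.isdigit el then (st.1, st.2 ++ [el])
  else if st.2 ≠ [] then (st.1 ++ [pvInt st.2], []) else st

def func (s : String) : Int :=
  let st := s.toList.foldl funcStep ([], [])
  let result := if st.2 ≠ [] then st.1 ++ [pvInt st.2] else st.1
  (PySem.List.max? result (fun x => x)).getD 0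

-- ===== PORT B =====
def pvBlank (c : Char) : Char := if PySem.Chars.isdigit c then c else ' '

def func_alt (s : String) : Int :=
  let spaced := s.toList.map pvBlank
  let nums := (PySem.Chars.split₀ spaced).map pvInt
  (PySem.List.max? nums (fun x => x)).getD 0

-- ===== PRECONDITION & SPEC =====
-- Pre_ excludes strings with no digit character: there max() raises ValueError in A (and in B alike).
def Pre_func (s : String) : Prop := s.toList.any PySem.Chars.isdigit = true
instance (s : String) : Decidable (Pre_func s) := by unfold Pre_func; infer_instance
def pvWitness_func : String := "a12 7"

def Spec_func (s : String) (out : Int) : Prop := out = func_alt s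
instance (s : String) (out : Int) : Decidable (Spec_func s out) := by unfold Spec_func; infer_instance

-- ===== CLAIM (what is proved, stated in full; the proofs are below) =====
def Claim_equal_func : Prop := ∀ (s : String), Dom_func s → Pre_func s → Spec_func s (func s)

-- ===== LEMMAS AND PROOFS =====
-- the list of integers A's loop collects, as a function of the remaining input and the buffer
def pvCollect (cur : List Char) : List Char → List Int
  | [] => if cur ≠ [] then [pvInt cur] else []
  | c :: l =>
    if PySem.Chars.isdigit c then pvCollect (cur ++ [c]) l
    else (if cur ≠ [] then [pvInt cur] else []) ++ pvCollect [] l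

def pvFin (st : List Int × List Char) : List Int :=
  if st.2 ≠ [] then st.1 ++ [pvInt st.2] else st.1

theorem pvFin_foldl (l : List Char) : ∀ (r : List Int) (c : List Char),
    pvFin (l.foldl funcStep (r, c)) = r ++ pvCollect c l := by
  induction l with
  | nil =>
    intro r c
    simp [pvFin, pvCollect]
    split_ifs <;> simp
  | cons el l ih =>
    intro r c
    by_cases hd : PySem.Chars.isdigit el
    · simp [List.foldl, funcStep, hd, pvCollect, ih]
    · by_cases hc : c = []
      · subst hc
        simp [List.foldl, funcStep, hd, pvCollect, ih]
      · simp [List.foldl, funcStep, hd, hc, pvCollect, ih]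

theorem digit_not_space (c : Char) (h : PySem.Chars.isdigit c = true) :
    PySem.Chars.isspace c = false := by
  simp only [PySem.Chars.isdigit, Bool.and_eq_true, decide_eq_true_eq, Char.le_def,
    UInt32.le_iff_toNat_le] at h
  rw [show ('0').val.toNat = 48 from rfl, show ('9').val.toNat = 57 from rfl] at h
  simp only [PySem.Chars.isspace, Char.toNat, Bool.or_eq_false_iff, Bool.and_eq_false_iff,
    decide_eq_false_iff_not]
  omega

theorem space_isspace : PySem.Chars.isspace ' ' = true := by decide

-- B's whitespace split of the translated string yields exactly the runs A's buffer collects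
theorem split_go_collect (l : List Char) : ∀ (cur : List Char) (acc : List (List Char)),
    (PySem.Chars.split₀.go (l.map pvBlank) cur acc).map pvInt
      = acc.reverse.map pvInt ++ pvCollect cur.reverse l := by
  induction l with
  | nil =>
    intro cur acc
    by_cases hc : cur = []
    · subst hc
      simp [PySem.Chars.split₀.go, pvCollect]
    · simp [PySem.Chars.split₀.go, pvCollect, List.isEmpty_iff, hc]
  | cons c l ih =>
    intro cur acc
    by_cases hd : PySem.Chars.isdigit c
    · have hs := digit_not_space c hd
      have h1 : pvBlank c = c := by simp [pvBlank, hd]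
      simp only [List.map_cons, h1, PySem.Chars.split₀.go, hs, Bool.false_eq_true, if_false]
      rw [ih (c :: cur) acc]
      simp [pvCollect, hd]
    · have h1 : pvBlank c = ' ' := by simp [pvBlank, hd]
      by_cases hc : cur = []
      · subst hc
        simp only [List.map_cons, h1, PySem.Chars.split₀.go, space_isspace, if_true,
          List.isEmpty_nil]
        rw [ih [] acc]
        simp [pvCollect, hd]
      · simp only [List.map_cons, h1, PySem.Chars.split₀.go, space_isspace, if_true,
          List.isEmpty_iff, hc, if_false]
        rw [ih [] (cur.reverse :: acc)]
        simp [pvCollect, hd, hc]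

theorem func_eq_alt (s : String) : func s = func_alt s := by
  simp only [func, func_alt]
  have hA : (if (s.toList.foldl funcStep ([], [])).2 ≠ [] then
        (s.toList.foldl funcStep ([], [])).1 ++ [pvInt (s.toList.foldl funcStep ([], [])).2]
      else (s.toList.foldl funcStep ([], [])).1) = pvFin (s.toList.foldl funcStep ([], [])) := rfl
  rw [hA, pvFin_foldl s.toList [] []]
  have hB : (PySem.Chars.split₀ (s.toList.map pvBlank)).map pvInt = pvCollect [] s.toList := by
    have := split_go_collect s.toList [] []
    simpa [PySem.Chars.split₀] using this
  rw [← hB]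
  rfl

-- ===== VERDICT (by name: the statement is the Claim_ definition above) =====
theorem func_spec : Claim_equal_func := by
  intro s _ _
  unfold Spec_func
  exact func_eq_alt s
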